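-- pv_equiv track=rewrite | github.com/nhennigan/FYP | backend/seating_matrix.py | plot_seating_chart
-- ===== SOURCE A (Python) =====
-- def plot_seating_chart(venue,seat_no):
--     mat = []
-- #    if request.method == 'POST' and 'venue' in request.form and 'seat_no' in request.form:
-- #        seating_chart.plot_seating(request.form['venue'],request.form['seat_no'])
--     kingfisher_length =25
--     kingfisher_breadth = 25
--     bailey_allen_length = 20
--     bailey_allen_breadth = 30
--     engineering_length = 10
--     engineering_breadth = 4
--     galway_bay_length = 8
--     galway_bay_breadth = 10
--     leisureland_length = 5
--     leisureland_breadth = 10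
--
--     if venue == "Kingfisher":
--         length = kingfisher_length
--         breadth = kingfisher_breadth
--     elif venue == "Bailey Allen Hall":
--         length = bailey_allen_length
--         breadth = bailey_allen_breadth
--     elif venue == "Alice Perry Engineering Building":
--         length = engineering_length
--         breadth = engineering_breadth
--     elif venue == "Galway Bay Hotel":
--         length = galway_bay_length
--         breadth = galway_bay_breadth
--     else:
--         length = leisureland_length
--         breadth = leisureland_breadth
--
--     mat = []
--     for i in range(length):
--         rowList = []
--         for j in range(breadth):
--             # you need to increment through dataList here, like this:
--             rowList.append('clear_chair.PNG')
--         mat.append(rowList)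
--
--     counter=0
--     x_count=-1
--     for x in mat:
--         x_count +=1
--         y_count=-1
--         for y in x:
--             y_count+=1
--             counter +=1
--             if counter == int(seat_no):
--                 mat[x_count][y_count]='highlighted_chair.png'
--
--     mat_t = list(zip(*mat))
--
-- #    f_name,l_name,course = conn.get_student_data(session["username"])
-- #    exam_list = conn.get_exam_data(session["username"])
-- #    user_in = User(session["username"],f_name,l_name,course)
--     return mat_t
-- ===== SOURCE B (Python) =====
-- SIZES = {
--     "Kingfisher": (25, 25),
--     "Bailey Allen Hall": (20, 30),
--     "Alice Perry Engineering Building": (10, 4),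
--     "Galway Bay Hotel": (8, 10),
-- }
--
-- def plot_seating_chart(venue, seat_no):
--     length, breadth = SIZES.get(venue, (5, 10))
--     n = int(seat_no)  # unconditional, like A: bad input raises ValueError
--     grid = [["clear_chair.PNG"] * length for _ in range(breadth)]
--     if 1 <= n <= length * breadth:
--         grid[(n - 1) % breadth][(n - 1) // breadth] = "highlighted_chair.png"
--     return [tuple(row) for row in grid]
-- ===== Notes on version B (the rewrite author's own statement) =====
-- stated objective: simpler
-- what changed: B builds the transposed grid directly and places the highlighted seat by coordinate arithmetic ((n-1)%breadth, (n-1)//breadth), replacing A's build pass, full cell-by-cell highlight scan and zip(*mat) transpose.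
import Mathlib
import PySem

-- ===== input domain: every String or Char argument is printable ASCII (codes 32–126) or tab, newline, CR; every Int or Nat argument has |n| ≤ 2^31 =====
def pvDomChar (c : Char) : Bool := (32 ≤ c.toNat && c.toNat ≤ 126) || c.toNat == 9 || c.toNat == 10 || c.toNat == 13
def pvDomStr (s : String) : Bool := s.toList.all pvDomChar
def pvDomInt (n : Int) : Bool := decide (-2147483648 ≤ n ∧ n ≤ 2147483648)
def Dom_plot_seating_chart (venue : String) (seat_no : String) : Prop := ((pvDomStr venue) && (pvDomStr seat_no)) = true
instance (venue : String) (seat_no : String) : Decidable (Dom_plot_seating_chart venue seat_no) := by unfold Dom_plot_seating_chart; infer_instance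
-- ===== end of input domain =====

-- B replaces A's build-then-scan-highlight-then-zip-transpose with a direct construction of the
-- transposed grid, placing the highlighted seat by coordinate arithmetic (simpler, single placement).

-- ===== PORT A =====
def pvClear : String := "clear_chair.PNG"
def pvHigh : String := "highlighted_chair.png"

-- mat = []; for i in range(length): rowList = []; for j in range(breadth): rowList.append(clear); mat.append(rowList)
def pvMatA (l b : Int) : List (List String) :=
  (PySem.List.pyRange 0 l 1).foldl
    (fun m _ => m ++ [(PySem.List.pyRange 0 b 1).foldl (fun r _ => r ++ [pvClear]) []]) []

-- inner loop: for y in x: y_count += 1; counter += 1; if counter == n: mat[x_count][y_count] = high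
-- (the assignment replaces exactly the cell just visited, i.e. this per-cell rewrite)
def pvHlCells : List String → Int → Int → List String
  | [], _, _ => []
  | c :: cs, counter, n =>
      (if counter + 1 = n then pvHigh else c) :: pvHlCells cs (counter + 1) n

-- outer loop over mat, threading the running counter across rows
def pvHlRows : List (List String) → Int → Int → List (List String)
  | [], _, _ => []
  | r :: rs, counter, n => pvHlCells r counter n :: pvHlRows rs (counter + r.length) n

-- list(zip(*mat)): exact Python zip semantics (truncates at the shortest row; zip of no rows = [])
def pvZip (mat : List (List String)) : List (List String) :=
  match (mat.map List.length).min? with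
  | none => []
  | some m => (List.range m).map (fun j => mat.map (fun row => row.getD j ""))

def plot_seating_chart (venue : String) (seat_no : String) : List (List String) :=
  let l : Int := if venue = "Kingfisher" then 25
    else if venue = "Bailey Allen Hall" then 20
    else if venue = "Alice Perry Engineering Building" then 10
    else if venue = "Galway Bay Hotel" then 8 else 5
  let b : Int := if venue = "Kingfisher" then 25
    else if venue = "Bailey Allen Hall" then 30
    else if venue = "Alice Perry Engineering Building" then 4
    else if venue = "Galway Bay Hotel" then 10 else 10
  let n : Int := (PySem.Int.ofStr? seat_no).getD 0   -- none = ValueError, excluded by Pre_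
  pvZip (pvHlRows (pvMatA l b) 0 n)

-- ===== PORT B =====
-- grid = [[clear]*length for _ in range(breadth)]; if 1 <= n <= length*breadth: grid[(n-1)%breadth][(n-1)//breadth] = high
def pvAltGrid (l b n : Int) : List (List String) :=
  let grid := List.replicate b.toNat (List.replicate l.toNat pvClear)
  if 1 ≤ n ∧ n ≤ l * b then
    let r := (PySem.Int.mod (n - 1) b).toNat
    let c := (PySem.Int.floordiv (n - 1) b).toNat
    grid.set r ((grid.getD r []).set c pvHigh)
  else grid

def plot_seating_chart_alt (venue : String) (seat_no : String) : List (List String) :=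
  let p : Int × Int := if venue = "Kingfisher" then (25, 25)
    else if venue = "Bailey Allen Hall" then (20, 30)
    else if venue = "Alice Perry Engineering Building" then (10, 4)
    else if venue = "Galway Bay Hotel" then (8, 10) else (5, 10)
  let n : Int := (PySem.Int.ofStr? seat_no).getD 0   -- none = ValueError, excluded by Pre_
  pvAltGrid p.1 p.2 n

-- ===== PRECONDITION & SPEC =====
-- Pre_ excludes exactly the seat_no strings int() rejects, where A (and B) raise ValueError.
def Pre_plot_seating_chart (venue : String) (seat_no : String) : Prop :=
  (PySem.Int.ofStr? seat_no).isSome = true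
instance (venue : String) (seat_no : String) : Decidable (Pre_plot_seating_chart venue seat_no) := by
  unfold Pre_plot_seating_chart; infer_instance

def pvWitness_plot_seating_chart : String × String := ("Kingfisher", "3")

def Spec_plot_seating_chart (venue : String) (seat_no : String) (out : List (List String)) : Prop := out = plot_seating_chart_alt venue seat_no
instance (venue : String) (seat_no : String) (out : List (List String)) : Decidable (Spec_plot_seating_chart venue seat_no out) := by unfold Spec_plot_seating_chart; infer_instance

-- ===== CLAIM (what is proved, stated in full; the proofs are below) =====
def Claim_equal_plot_seating_chart : Prop := ∀ (venue : String) (seat_no : String), Dom_plot_seating_chart venue seat_no → Pre_plot_seating_chart venue seat_no → Spec_plot_seating_chart venue seat_no (plot_seating_chart venue seat_no)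

-- ===== LEMMAS AND PROOFS =====

lemma pvMatA_eq (l b : Int) :
    pvMatA l b = List.replicate l.toNat (List.replicate b.toNat pvClear) := by
  unfold pvMatA
  rw [PySem.List.foldl_append_singleton_eq_map]
  have h : (PySem.List.pyRange 0 b 1).foldl (fun r _ => r ++ [pvClear]) [] =
      List.replicate b.toNat pvClear := by
    rw [PySem.List.foldl_append_singleton_eq_map]
    simp [PySem.List.pyRange_one, Function.comp_def, List.map_const', List.length_range]
  rw [h]
  simp [PySem.List.pyRange_one, Function.comp_def, List.map_const', List.length_range]

lemma pvHlCells_replicate (k : Nat) (c0 n : Int) :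
    pvHlCells (List.replicate k pvClear) c0 n =
      (List.range k).map (fun (j : Nat) => if c0 + (j : Int) + 1 = n then pvHigh else pvClear) := by
  induction k generalizing c0 with
  | zero => simp [pvHlCells]
  | succ m ih =>
    rw [List.replicate_succ, List.range_succ_eq_map, List.map_cons, List.map_map]
    simp only [pvHlCells, ih (c0 + 1)]
    congr 1
    · norm_num
    · apply List.map_congr_left; intro j _
      simp [Function.comp]; ring_nf

lemma pvHlRows_replicate (L B : Nat) (c0 n : Int) :
    pvHlRows (List.replicate L (List.replicate B pvClear)) c0 n =
      (List.range L).map (fun (i : Nat) => pvHlCells (List.replicate B pvClear) (c0 + (i : Int) * B) n) := by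
  induction L generalizing c0 with
  | zero => simp [pvHlRows]
  | succ m ih =>
    rw [List.replicate_succ, List.range_succ_eq_map, List.map_cons, List.map_map]
    simp only [pvHlRows, List.length_replicate, ih (c0 + B)]
    congr 1
    · norm_num
    · apply List.map_congr_left; intro i _
      simp [Function.comp]; ring_nf

-- seat n sits at row i, column j of A's mat  ↔  B's coordinates point at (j, i) of the transpose
lemma pvCoord (B i j : Nat) (n : Int) (hB : 0 < B) (hj : j < B) (h1 : 1 ≤ n) :
    ((i : Int) * B + j + 1 = n) ↔
      ((PySem.Int.mod (n - 1) B).toNat = j ∧ (PySem.Int.floordiv (n - 1) B).toNat = i) := by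
  have hB' : (0 : Int) < B := by exact_mod_cast hB
  rw [PySem.Int.mod_eq_emod_of_pos hB', PySem.Int.floordiv_eq_ediv_of_pos hB']
  constructor
  · intro h
    have hn : n - 1 = (j : Int) + (B : Int) * i := by rw [← h]; ring
    have hj' : ((j : Int)) % (B : Int) = j := Int.emod_eq_of_lt (by positivity) (by exact_mod_cast hj)
    have hjd : ((j : Int)) / (B : Int) = 0 := Int.ediv_eq_zero_of_lt (by positivity) (by exact_mod_cast hj)
    rw [hn, Int.add_mul_emod_self_left, Int.add_mul_ediv_left _ _ (by omega), hj', hjd]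
    simp
  · rintro ⟨hj', hi'⟩
    have h0 : (0 : Int) ≤ n - 1 := by omega
    have hmn : (n - 1) % (B : Int) + (B : Int) * ((n - 1) / (B : Int)) = n - 1 :=
      Int.emod_add_mul_ediv _ _
    have hm0 : (0 : Int) ≤ (n - 1) % (B : Int) := Int.emod_nonneg _ (by omega)
    have hd0 : (0 : Int) ≤ (n - 1) / (B : Int) := Int.ediv_nonneg h0 (by omega)
    have e1 : ((n - 1) % (B : Int)) = (j : Int) := by rw [← hj', Int.toNat_of_nonneg hm0]
    have e2 : ((n - 1) / (B : Int)) = (i : Int) := by rw [← hi', Int.toNat_of_nonneg hd0]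
    rw [e1, e2] at hmn
    linarith [hmn]

lemma pvMaster (l b : Int) (hl : 0 < l) (hb : 0 < b) (n : Int) :
    pvZip (pvHlRows (pvMatA l b) 0 n) = pvAltGrid l b n := by
  set L := l.toNat with hLdef
  set B := b.toNat with hBdef
  have hL : 0 < L := by omega
  have hB : 0 < B := by omega
  have hlc : (L : Int) = l := Int.toNat_of_nonneg hl.le
  have hbc : (B : Int) = b := Int.toNat_of_nonneg hb.le
  have hmat2 : pvHlRows (pvMatA l b) 0 n =
      (List.range L).map (fun (i : Nat) =>
        (List.range B).map (fun (j : Nat) =>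
          if (i : Int) * B + (j : Int) + 1 = n then pvHigh else pvClear)) := by
    rw [pvMatA_eq, pvHlRows_replicate]
    apply List.map_congr_left; intro i _
    rw [pvHlCells_replicate]
    apply List.map_congr_left; intro j _
    ring_nf
    rw [← hBdef]
  rw [hmat2]
  have hlen : ((List.range L).map (fun (i : Nat) =>
        (List.range B).map (fun (j : Nat) =>
          if (i : Int) * B + (j : Int) + 1 = n then pvHigh else pvClear))).map List.length
      = List.replicate L B := by
    simp [List.map_map, Function.comp_def, List.map_const', List.length_range]
  unfold pvZip
  rw [hlen, List.min?_replicate]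
  rw [if_neg (by omega : ¬ L = 0)]
  have hgetD : ∀ (f : Nat → String) (k m : Nat), k < m → ((List.range m).map f).getD k "" = f k := by
    intro f k m hk
    simp [List.getD, hk]
  unfold pvAltGrid
  rw [← hlc, ← hbc]
  simp only [Int.toNat_natCast]
  by_cases hcond : 1 ≤ n ∧ n ≤ (L : Int) * (B : Int)
  · rw [if_pos hcond]
    obtain ⟨h1, _⟩ := hcond
    apply List.ext_getElem
    · simp
    intro j hj1 hj2
    have hj : j < B := by simpa using hj1
    have hrow : (List.replicate B (List.replicate L pvClear)).getD
        ((PySem.Int.mod (n - 1) (B : Int)).toNat) [] = List.replicate L pvClear := by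
      have hr : (PySem.Int.mod (n - 1) (B : Int)).toNat < B := by
        have := PySem.Int.mod_lt (n - 1) (by exact_mod_cast hB : (0:Int) < (B:Int))
        omega
      simp [List.getD, hr]
    simp only [hrow, List.getElem_map, List.getElem_range, List.getElem_set,
      List.getElem_replicate]
    by_cases er : (PySem.Int.mod (n - 1) (B : Int)).toNat = j
    · rw [if_pos er]
      apply List.ext_getElem
      · simp [List.length_set]
      intro i hi1 hi2
      have hi : i < L := by simpa using hi1
      simp only [List.getElem_map, List.getElem_range]
      rw [hgetD _ j B hj]
      have hiff := pvCoord B i j n hB hj h1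
      simp only [List.getElem_set, List.getElem_replicate]
      by_cases hc : (i : Int) * B + (j : Int) + 1 = n
      · obtain ⟨e1, e2⟩ := hiff.mp hc
        rw [if_pos hc, if_pos e2]
      · rw [if_neg hc, if_neg]
        intro e2
        exact hc (hiff.mpr ⟨er, e2⟩)
    · rw [if_neg er]
      apply List.ext_getElem
      · simp
      intro i hi1 hi2
      have hi : i < L := by simpa using hi1
      simp only [List.getElem_map, List.getElem_range, List.getElem_replicate]
      rw [hgetD _ j B hj]
      rw [if_neg]
      intro hc
      have hiff := pvCoord B i j n hB hj h1
      exact er (hiff.mp hc).1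
  · rw [if_neg hcond]
    apply List.ext_getElem
    · simp
    intro j hj1 hj2
    have hj : j < B := by simpa using hj1
    rw [List.getElem_map]
    apply List.ext_getElem
    · simp
    intro i hi1 hi2
    have hi : i < L := by simpa using hi1
    simp only [List.getElem_range, List.getElem_map, List.getElem_replicate]
    rw [hgetD _ j B hj]
    rw [if_neg]
    intro hc
    apply hcond
    constructor
    · nlinarith [Int.natCast_nonneg i, Int.natCast_nonneg j, (by exact_mod_cast hB : (0:Int) < (B:Int))]
    · have hiL : (i : Int) + 1 ≤ (L : Int) := by exact_mod_cast hi
      have hjB : (j : Int) + 1 ≤ (B : Int) := by exact_mod_cast hj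
      nlinarith [hiL, hjB, (by exact_mod_cast hB : (0:Int) < (B:Int))]

-- ===== VERDICT (by name: the statement is the Claim_ definition above) =====
theorem plot_seating_chart_spec : Claim_equal_plot_seating_chart := by
  intro venue seat_no _ _
  unfold Spec_plot_seating_chart plot_seating_chart plot_seating_chart_alt
  by_cases h1 : venue = "Kingfisher" <;>
    by_cases h2 : venue = "Bailey Allen Hall" <;>
      by_cases h3 : venue = "Alice Perry Engineering Building" <;>
        by_cases h4 : venue = "Galway Bay Hotel" <;>
          simp only [h1, h2, h3, h4, if_true, if_false] <;>
          exact pvMaster _ _ (by decide) (by decide) _
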